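-- pv_equiv track=rewrite | github.com/StupidStrawberry/9-11 | main.py | how_much_same
-- ===== SOURCE A (Python) =====
-- def how_much_same(mas_a, mas_b):
--     """
--     Подсчитывает количество одинаковых элементов в двух массивах.
--
--     :param mas_a: Первый массив.
--     :param mas_b: Второй массив.
--     :return: Количество одинаковых элементов.
--     """
--     k = 0
--     for i in range(len(mas_a)):
--         a = abs(mas_a[i])
--         for j in range(len(mas_b)):
--             b = abs(mas_b[j])
--             if a == b:
--                 k += 1
--     return k
-- ===== SOURCE B (Python) =====
-- def how_much_same(mas_a, mas_b):
--     cnt = {}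
--     for b in mas_b:
--         v = abs(b)
--         cnt[v] = cnt.get(v, 0) + 1
--     k = 0
--     for a in mas_a:
--         k += cnt.get(abs(a), 0)
--     return k
-- ===== Notes on version B (the rewrite author's own statement) =====
-- stated objective: faster
-- what changed: Replaced the nested O(n*m) double loop by a single pass that builds a hash-map counter of absolute values of mas_b and then sums the per-element lookup counts over mas_a.
import Mathlib
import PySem

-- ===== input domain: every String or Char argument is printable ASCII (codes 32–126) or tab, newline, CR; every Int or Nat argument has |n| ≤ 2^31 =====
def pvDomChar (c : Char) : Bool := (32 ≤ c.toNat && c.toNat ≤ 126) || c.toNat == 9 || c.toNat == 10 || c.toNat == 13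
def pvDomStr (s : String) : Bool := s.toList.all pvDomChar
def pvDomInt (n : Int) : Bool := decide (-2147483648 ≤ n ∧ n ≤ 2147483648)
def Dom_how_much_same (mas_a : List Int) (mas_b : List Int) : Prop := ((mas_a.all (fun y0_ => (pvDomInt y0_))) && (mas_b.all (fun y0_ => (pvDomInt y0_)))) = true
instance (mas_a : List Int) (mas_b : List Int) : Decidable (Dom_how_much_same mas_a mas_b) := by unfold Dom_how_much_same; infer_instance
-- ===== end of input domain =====

-- B replaces A's nested double loop by a one-pass counter over |mas_b| plus lookups (faster).

-- ===== PORT A =====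
def how_much_same (mas_a : List Int) (mas_b : List Int) : Int :=
  (PySem.List.pyRange 0 mas_a.length 1).foldl (fun k i =>
    let a := |PySem.List.pyGetD mas_a i 0|
    (PySem.List.pyRange 0 mas_b.length 1).foldl (fun k j =>
      let b := |PySem.List.pyGetD mas_b j 0|
      if a = b then k + 1 else k) k) 0

-- ===== PORT B =====
def how_much_same_alt (mas_a : List Int) (mas_b : List Int) : Int :=
  let cnt : PySem.Dict Int Int :=
    mas_b.foldl (fun d b => d.insert |b| (d.getD |b| 0 + 1)) PySem.Dict.empty
  mas_a.foldl (fun k a => k + cnt.getD |a| 0) 0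

-- ===== PRECONDITION & SPEC =====
def Spec_how_much_same (mas_a : List Int) (mas_b : List Int) (out : Int) : Prop := out = how_much_same_alt mas_a mas_b
instance (mas_a : List Int) (mas_b : List Int) (out : Int) : Decidable (Spec_how_much_same mas_a mas_b out) := by unfold Spec_how_much_same; infer_instance

-- ===== CLAIM (what is proved, stated in full; the proofs are below) =====
def Claim_equal_how_much_same : Prop := ∀ (mas_a : List Int) (mas_b : List Int), Dom_how_much_same mas_a mas_b → Spec_how_much_same mas_a mas_b (how_much_same mas_a mas_b)

-- ===== LEMMAS AND PROOFS =====

-- A's inner scan of mas_b adds the number of elements of mas_b whose absolute value equals a.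
theorem inner_count (a : Int) (l : List Int) (k : Int) :
    l.foldl (fun k b => if a = |b| then k + 1 else k) k
      = k + ((l.map (fun x => |x|)).count a : Int) := by
  induction l generalizing k with
  | nil => simp
  | cons x xs ih =>
    simp only [List.foldl_cons, List.map_cons, List.count_cons, ih]
    by_cases h : a = |x| <;> simp [h] <;> omega

theorem portA_eq (mas_a mas_b : List Int) :
    how_much_same mas_a mas_b
      = mas_a.foldl (fun k a => k + ((mas_b.map (fun x => |x|)).count |a| : Int)) 0 := by
  unfold how_much_same
  show (PySem.List.pyRange 0 mas_a.length 1).foldl (fun k i =>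
      (PySem.List.pyRange 0 mas_b.length 1).foldl
        (fun k j => if |PySem.List.pyGetD mas_a i 0| = |PySem.List.pyGetD mas_b j 0| then k + 1 else k) k) 0
    = mas_a.foldl (fun k a => k + ((mas_b.map (fun x => |x|)).count |a| : Int)) 0
  rw [PySem.List.foldl_pyRange_zero_pyGetD' mas_a 0
    (fun k a => (PySem.List.pyRange 0 mas_b.length 1).foldl
      (fun k j => if |a| = |PySem.List.pyGetD mas_b j 0| then k + 1 else k) k) 0]
  apply PySem.List.foldl_congr_mem
  intro k a _
  rw [PySem.List.foldl_pyRange_zero_pyGetD' mas_b 0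
    (fun k b => if |a| = |b| then k + 1 else k) k]
  exact inner_count _ _ _

-- B's counter lookup returns the multiplicity of v among the absolute values of l.
theorem getD_absCounter (l : List Int) (d : PySem.Dict Int Int) (v : Int) :
    (l.foldl (fun d b => d.insert |b| (d.getD |b| 0 + 1)) d).getD v 0
      = d.getD v 0 + ((l.map (fun x => |x|)).count v : Int) := by
  induction l generalizing d with
  | nil => simp
  | cons x xs ih =>
    simp only [List.foldl_cons, List.map_cons, List.count_cons, ih,
      PySem.Dict.getD_insert]
    by_cases h : v = |x| <;> simp [h] <;> omega

theorem portB_eq (mas_a mas_b : List Int) :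
    how_much_same_alt mas_a mas_b
      = mas_a.foldl (fun k a => k + ((mas_b.map (fun x => |x|)).count |a| : Int)) 0 := by
  unfold how_much_same_alt
  apply PySem.List.foldl_congr_mem
  intro k a _
  rw [getD_absCounter, PySem.Dict.getD_empty]
  omega

-- ===== VERDICT (by name: the statement is the Claim_ definition above) =====
theorem how_much_same_spec : Claim_equal_how_much_same := by
  intro mas_a mas_b _
  unfold Spec_how_much_same
  rw [portA_eq, portB_eq]
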